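-- pv_equiv track=rewrite | github.com/seggle01/EPL499-Team-Project-Team5 | src/bert_approach/features/feature_extraction.py | count_specified_punctuations
-- ===== SOURCE A (Python) =====
-- def count_specified_punctuations(text: str, punct_list: list):
--     """
--     Method to count the occurrences of each punctuation mark in a given text.
--
--     Parameters
--     ----------
--     text : str
--         Text to count punctuations.
--     punct_list : list
--         List of punctuation marks to count.
--
--     Returns
--     -------
--     dict : Dictionary of the form {'punctuation_char1': count1, 'punctuation_char2': count2, ...}
--     """
--     punct_occur = {}
--     for char in punct_list:
--         punct_occur[char] = 0
--     for char in text: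
--         if char in punct_list:
--             punct_occur[char] += 1
--     return punct_occur
-- ===== SOURCE B (Python) =====
-- def count_specified_punctuations(text: str, punct_list: list):
--     # Tabulate the frequency of every character once, then look each
--     # punctuation mark up (absent keys, incl. multi-char entries, give 0).
--     counts = {}
--     for ch in text:
--         counts[ch] = counts.get(ch, 0) + 1
--     return {p: counts.get(p, 0) for p in punct_list}
-- ===== Notes on version B (the rewrite author's own statement) =====
-- stated objective: faster
-- what changed: Replaces the per-character 'char in punct_list' list scan with a full frequency table built in one pass over the text, followed by a lookup pass over punct_list.
import Mathlib
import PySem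

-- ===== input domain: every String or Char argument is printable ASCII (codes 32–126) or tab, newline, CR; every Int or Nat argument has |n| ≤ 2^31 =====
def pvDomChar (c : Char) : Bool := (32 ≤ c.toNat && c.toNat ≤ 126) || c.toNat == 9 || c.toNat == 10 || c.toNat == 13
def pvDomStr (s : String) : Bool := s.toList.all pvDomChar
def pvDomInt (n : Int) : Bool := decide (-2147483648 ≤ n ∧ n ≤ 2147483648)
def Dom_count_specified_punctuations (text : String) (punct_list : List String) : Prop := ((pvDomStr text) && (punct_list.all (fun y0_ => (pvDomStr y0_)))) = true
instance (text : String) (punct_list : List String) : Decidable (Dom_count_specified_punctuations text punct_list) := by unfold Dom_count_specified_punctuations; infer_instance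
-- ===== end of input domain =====

-- B builds a full character-frequency table of the text in one pass, then looks each
-- punctuation mark up, instead of A's per-character membership scan of punct_list.


-- ===== PORT A =====
-- punct_occur = {}; for char in punct_list: punct_occur[char] = 0;
-- for char in text: if char in punct_list: punct_occur[char] += 1
def count_specified_punctuations (text : String) (punct_list : List String) : List (String × Int) :=
  let d0 : PySem.Dict String Int :=
    punct_list.foldl (fun d p => d.insert p 0) PySem.Dict.empty
  let d1 :=
    text.toList.foldl (fun d c =>
      if punct_list.contains (String.singleton c) then
        d.insert (String.singleton c) (d.getD (String.singleton c) 0 + 1)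
      else d) d0
  d1.items

-- ===== PORT B =====
-- counts = {}; for ch in text: counts[ch] = counts.get(ch, 0) + 1;
-- return {p: counts.get(p, 0) for p in punct_list}
def count_specified_punctuations_alt (text : String) (punct_list : List String) : List (String × Int) :=
  let counts : PySem.Dict String Int :=
    (text.toList.map String.singleton).foldl
      (fun d s => d.insert s (d.getD s 0 + 1)) PySem.Dict.empty
  (punct_list.foldl (fun d p => d.insert p (counts.getD p 0)) PySem.Dict.empty).items

-- ===== PRECONDITION & SPEC =====
def Spec_count_specified_punctuations (text : String) (punct_list : List String) (out : List (String × Int)) : Prop := out = count_specified_punctuations_alt text punct_list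
instance (text : String) (punct_list : List String) (out : List (String × Int)) : Decidable (Spec_count_specified_punctuations text punct_list out) := by unfold Spec_count_specified_punctuations; infer_instance

-- ===== CLAIM (what is proved, stated in full; the proofs are below) =====
def Claim_equal_count_specified_punctuations : Prop := ∀ (text : String) (punct_list : List String), Dom_count_specified_punctuations text punct_list → Spec_count_specified_punctuations text punct_list (count_specified_punctuations text punct_list)

-- ===== LEMMAS AND PROOFS =====

-- A loop inserting a value v q at each q of l: final lookup at p is v p if p ∈ l.
theorem getD_foldl_insert_fun (v : String → Int) :
    ∀ (l : List String) (d : PySem.Dict String Int) (p : String),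
      (l.foldl (fun d q => d.insert q (v q)) d).getD p 0
        = if p ∈ l then v p else d.getD p 0 := by
  intro l
  induction l with
  | nil => intro d p; simp
  | cons q t ih =>
    intro d p
    simp only [List.foldl_cons, ih, List.mem_cons]
    by_cases hpt : p ∈ t
    · simp [hpt]
    · by_cases hpq : p = q
      · subst hpq; simp [hpt, PySem.Dict.getD_insert_self]
      · simp [hpt, hpq, PySem.Dict.getD_insert]

-- A's counting loop: keys already present stay, lookup at p ∈ punct_list accumulates count.
theorem getD_countLoop (P : List String) (p : String) (hp : p ∈ P) :
    ∀ (l : List Char) (d : PySem.Dict String Int),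
      (l.foldl (fun d c =>
          if P.contains (String.singleton c) then
            d.insert (String.singleton c) (d.getD (String.singleton c) 0 + 1)
          else d) d).getD p 0
        = d.getD p 0 + ((l.map String.singleton).count p : Int) := by
  intro l
  induction l with
  | nil => intro d; simp
  | cons c t ih =>
    intro d
    simp only [List.foldl_cons, List.map_cons]
    by_cases hc : P.contains (String.singleton c) = true
    · rw [if_pos hc, ih]
      by_cases hps : p = String.singleton c
      · subst hps
        rw [PySem.Dict.getD_insert_self, List.count_cons_self]
        push_cast
        ring
      · rw [PySem.Dict.getD_insert d _ _ _ _, if_neg hps]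
        simp [Ne.symm hps]
    · rw [if_neg hc, ih]
      have hps : p ≠ String.singleton c := by
        intro h; subst h
        exact hc ((List.contains_iff_mem).mpr hp)
      simp [Ne.symm hps]

-- A's counting loop never changes the key list (every inserted key is already present).
theorem keys_countLoop (P : List String) :
    ∀ (l : List Char) (d : PySem.Dict String Int),
      (∀ p ∈ P, d.contains p = true) →
      (l.foldl (fun d c =>
          if P.contains (String.singleton c) then
            d.insert (String.singleton c) (d.getD (String.singleton c) 0 + 1)
          else d) d).keys = d.keys := by
  intro l
  induction l with
  | nil => intro d _; rfl
  | cons c t ih =>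
    intro d hd
    simp only [List.foldl_cons]
    by_cases hc : P.contains (String.singleton c) = true
    · have hmem : String.singleton c ∈ P := List.contains_iff_mem.mp hc
      have hk := PySem.Dict.keys_insert_of_contains d
        (d.getD (String.singleton c) 0 + 1) (hd _ hmem)
      rw [if_pos hc, ih _ (fun p hp => by
        have h := hd p hp
        rw [PySem.Dict.contains_iff_mem_keys] at h ⊢
        rw [hk]; exact h), hk]
    · rw [if_neg hc]
      exact ih d hd

-- ===== VERDICT (by name: the statement is the Claim_ definition above) =====
theorem count_specified_punctuations_spec : Claim_equal_count_specified_punctuations := by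
  intro text P _
  unfold Spec_count_specified_punctuations
  unfold count_specified_punctuations count_specified_punctuations_alt
  simp only []
  set M := text.toList.map String.singleton with hM
  set counts := M.foldl (fun d s => d.insert s (d.getD s 0 + 1)) (PySem.Dict.empty : PySem.Dict String Int) with hcounts
  set d0 := P.foldl (fun d p => d.insert p (0 : Int)) PySem.Dict.empty with hd0
  set dA := text.toList.foldl (fun d c =>
      if P.contains (String.singleton c) then
        d.insert (String.singleton c) (d.getD (String.singleton c) 0 + 1)
      else d) d0 with hdA
  set dB := P.foldl (fun d p => d.insert p (counts.getD p 0)) (PySem.Dict.empty : PySem.Dict String Int) with hdB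
  -- keys of d0 and dB
  have hkd0 : d0.keys = PySem.Set.update PySem.Dict.empty.keys P :=
    PySem.Dict.keys_foldl_insert P (fun _ _ => (0 : Int)) _
  have hkdB : dB.keys = PySem.Set.update PySem.Dict.empty.keys P :=
    PySem.Dict.keys_foldl_insert P (fun _ p => counts.getD p 0) _
  have hmemd0 : ∀ p ∈ P, d0.contains p = true := by
    intro p hp
    rw [PySem.Dict.contains_iff_mem_keys, hkd0, PySem.Set.mem_update]
    exact Or.inr hp
  have hkdA : dA.keys = d0.keys := keys_countLoop P text.toList d0 hmemd0
  have hndA : dA.keys.Nodup := by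
    rw [hkdA]
    exact PySem.Dict.nodup_keys_foldl_insert P _ _ PySem.Dict.nodup_keys_empty
  have hndB : dB.keys.Nodup :=
    PySem.Dict.nodup_keys_foldl_insert P _ _ PySem.Dict.nodup_keys_empty
  -- items via keys + getD
  rw [PySem.Dict.items_eq_map_keys dA hndA (0 : Int),
      PySem.Dict.items_eq_map_keys dB hndB (0 : Int), hkdA, hkd0, hkdB]
  apply List.map_congr_left
  intro p hpmem
  have hp : p ∈ P := by
    rcases (PySem.Set.mem_update _ _ _).mp hpmem with h | h
    · simp [PySem.Dict.keys_empty] at h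
    · exact h
  have hA : dA.getD p 0 = (M.count p : Int) := by
    rw [hdA, getD_countLoop P p hp text.toList d0, hd0,
        getD_foldl_insert_fun (fun _ => (0 : Int)) P _ p]
    simp [hp, hM]
  have hB : dB.getD p 0 = (M.count p : Int) := by
    rw [hdB, getD_foldl_insert_fun (fun q => counts.getD q 0) P _ p]
    simp only [hp, if_true]
    rw [hcounts, hM]
    exact PySem.Dict.getD_foldl_insert_add_one (text.toList.map String.singleton)
      PySem.Dict.empty p |>.trans (by simp)
  rw [hA, hB]
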